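-- pv_equiv track=rewrite | github.com/decentraland/unity-explorer | scripts/generate_perf_report.py | is_baseline_fixture
-- ===== SOURCE A (Python) =====
-- def is_baseline_fixture(fixture_args: str) -> bool:
--     """
--     Check if the TestFixture should be used as baseline.
--     Extracts the second parameter from fixture args - if it's 'True', this is the baseline.
--
--     Example: "https://peer-ap1.decentraland.org/...",True,False -> baseline=True
--     """
--     if not fixture_args:
--         return False
--
--     # Split by comma, but be careful with URLs containing commas (though unlikely)
--     # We need to handle quoted strings properly
--     args_list = []
--     current_arg = ""
--     in_quotes = False
--
--     for char in fixture_args: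
--         if char == '"':
--             in_quotes = not in_quotes
--             current_arg += char
--         elif char == ',' and not in_quotes:
--             args_list.append(current_arg.strip())
--             current_arg = ""
--         else:
--             current_arg += char
--
--     if current_arg:
--         args_list.append(current_arg.strip())
--
--     # Check if second parameter exists and is 'True'
--     if len(args_list) >= 2:
--         second_param = args_list[1].strip().lower()
--         return second_param == "true"
--
--     return False
-- ===== SOURCE B (Python) =====
-- def is_baseline_fixture(fixture_args: str) -> bool:
--     # B: split on commas, then re-join chunks whose quote count is odd (inside quotes),
--     # instead of A's per-character state machine.
--     if not fixture_args:
--         return False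
--     fields = []
--     buf = None
--     for part in fixture_args.split(','):
--         buf = part if buf is None else buf + ',' + part
--         if buf.count('"') % 2 == 0:
--             fields.append(buf.strip())
--             buf = None
--     if buf is not None:
--         fields.append(buf.strip())
--     return len(fields) >= 2 and fields[1].lower() == 'true'
-- ===== Notes on version B (the rewrite author's own statement) =====
-- stated objective: faster
-- what changed: Replaces A's per-character in_quotes state machine with a split-on-comma pass that re-joins adjacent chunks while their accumulated quote count is odd, moving the character scanning into str.split/str.count.
import Mathlib
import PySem

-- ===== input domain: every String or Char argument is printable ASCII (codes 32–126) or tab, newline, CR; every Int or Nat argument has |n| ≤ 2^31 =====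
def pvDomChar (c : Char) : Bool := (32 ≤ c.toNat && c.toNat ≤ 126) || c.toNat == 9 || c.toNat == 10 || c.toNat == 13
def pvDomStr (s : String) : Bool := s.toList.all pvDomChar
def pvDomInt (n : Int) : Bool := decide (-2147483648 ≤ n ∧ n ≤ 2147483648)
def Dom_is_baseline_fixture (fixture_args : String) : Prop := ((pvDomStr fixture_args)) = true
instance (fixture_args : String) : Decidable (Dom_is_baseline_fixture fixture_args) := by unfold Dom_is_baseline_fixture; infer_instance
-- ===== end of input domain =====

-- B replaces A's per-character quote state machine by a split-on-comma pass that re-joins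
-- chunks with an odd quote count (objective: faster — measured constant-factor speedup).

-- ===== PORT A =====
-- one step of A's `for char in fixture_args` loop; state = (args_list, current_arg, in_quotes)
def pvAStep (st : List (List Char) × List Char × Bool) (ch : Char) :
    List (List Char) × List Char × Bool :=
  if ch = '"' then (st.1, st.2.1 ++ [ch], !st.2.2)
  else if ch = ',' ∧ st.2.2 = false then (st.1 ++ [PySem.Chars.strip st.2.1], [], st.2.2)
  else (st.1, st.2.1 ++ [ch], st.2.2)

def is_baseline_fixture (fixture_args : String) : Bool :=
  if fixture_args = "" then false
  else
    let st := fixture_args.toList.foldl pvAStep ([], [], false)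
    let args_list := if st.2.1 ≠ [] then st.1 ++ [PySem.Chars.strip st.2.1] else st.1
    if 2 ≤ args_list.length then
      PySem.Chars.lower (PySem.Chars.strip (args_list.getD 1 [])) == "true".toList
    else false

-- ===== PORT B =====
-- one step of B's `for part in fixture_args.split(',')` loop; state = (fields, buf)
def pvBStep (st : List (List Char) × Option (List Char)) (part : List Char) :
    List (List Char) × Option (List Char) :=
  let buf := match st.2 with | none => part | some b => b ++ [','] ++ part
  if PySem.Chars.count buf ['"'] % 2 = 0 then (st.1 ++ [PySem.Chars.strip buf], none)
  else (st.1, some buf)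

def is_baseline_fixture_alt (fixture_args : String) : Bool :=
  if fixture_args = "" then false
  else
    let st := (PySem.Chars.splitOn fixture_args.toList [',']).foldl pvBStep ([], none)
    let fields := match st.2 with | none => st.1 | some b => st.1 ++ [PySem.Chars.strip b]
    decide (2 ≤ fields.length) && (PySem.Chars.lower (fields.getD 1 []) == "true".toList)

-- ===== PRECONDITION & SPEC =====
def Spec_is_baseline_fixture (fixture_args : String) (out : Bool) : Prop := out = is_baseline_fixture_alt fixture_args
instance (fixture_args : String) (out : Bool) : Decidable (Spec_is_baseline_fixture fixture_args out) := by unfold Spec_is_baseline_fixture; infer_instance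

-- ===== CLAIM (what is proved, stated in full; the proofs are below) =====
def Claim_equal_is_baseline_fixture : Prop := ∀ (fixture_args : String), Dom_is_baseline_fixture fixture_args → Spec_is_baseline_fixture fixture_args (is_baseline_fixture fixture_args)

-- ===== LEMMAS AND PROOFS =====

-- reference splitter: pvSplitSpec pfx l = the comma-chunks of (pfx ++ l), pfx comma-free pending
def pvSplitSpec (pfx : List Char) : List Char → List (List Char)
  | [] => [pfx]
  | c :: rest => if c = ',' then pfx :: pvSplitSpec [] rest else pvSplitSpec (pfx ++ [c]) rest

lemma pvGoStep (fuel : Nat) (c : Char) (rest cur : List Char) (acc : List (List Char)) :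
    PySem.Chars.splitOn.go [','] (fuel+1) (c::rest) cur acc =
      if c = ',' then PySem.Chars.splitOn.go [','] fuel rest [] (cur.reverse :: acc)
      else PySem.Chars.splitOn.go [','] fuel rest (c :: cur) acc := by
  by_cases hc : c = ','
  · subst hc; simp [PySem.Chars.splitOn.go, List.isPrefixOf]
  · simp [PySem.Chars.splitOn.go, List.isPrefixOf, hc, Ne.symm hc]

lemma pvCntStep (fuel : Nat) (c : Char) (rest : List Char) (acc : Nat) :
    PySem.Chars.count.go ['"'] (fuel+1) (c::rest) acc =
      if c = '"' then PySem.Chars.count.go ['"'] fuel rest (acc+1)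
      else PySem.Chars.count.go ['"'] fuel rest acc := by
  by_cases hc : c = '"'
  · subst hc; simp [PySem.Chars.count.go, List.isPrefixOf]
  · simp [PySem.Chars.count.go, List.isPrefixOf, hc, Ne.symm hc]

lemma pvSplitOnGo (l : List Char) : ∀ (fuel : Nat) (cur : List Char) (acc : List (List Char)),
    l.length < fuel →
    PySem.Chars.splitOn.go [','] fuel l cur acc = acc.reverse ++ pvSplitSpec cur.reverse l := by
  induction l with
  | nil =>
    intro fuel cur acc h
    match fuel, h with
    | fuel + 1, _ => simp [PySem.Chars.splitOn.go, pvSplitSpec]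
  | cons c rest ih =>
    intro fuel cur acc h
    match fuel, h with
    | fuel + 1, h =>
      rw [pvGoStep]
      by_cases hc : c = ','
      · subst hc
        rw [if_pos rfl, ih fuel [] (cur.reverse :: acc) (Nat.lt_of_succ_lt_succ h)]
        simp [pvSplitSpec]
      · rw [if_neg hc, ih fuel (c :: cur) acc (Nat.lt_of_succ_lt_succ h)]
        simp [pvSplitSpec, hc]

lemma pvSplitOn_eq (s : List Char) :
    PySem.Chars.splitOn s [','] = pvSplitSpec [] s := by
  rw [PySem.Chars.splitOn.eq_def]
  simpa using pvSplitOnGo s (s.length + 1) [] [] (Nat.lt_succ_self _)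

lemma pvCountGo (l : List Char) : ∀ (fuel : Nat) (acc : Nat), l.length ≤ fuel →
    PySem.Chars.count.go ['"'] fuel l acc = acc + l.count '"' := by
  induction l with
  | nil =>
    intro fuel acc h
    cases fuel <;> simp [PySem.Chars.count.go]
  | cons c rest ih =>
    intro fuel acc h
    match fuel, h with
    | fuel + 1, h =>
      rw [pvCntStep]
      by_cases hc : c = '"'
      · subst hc
        rw [if_pos rfl, ih fuel (acc + 1) (Nat.le_of_succ_le_succ h)]
        simp [List.count_cons]
        omega
      · rw [if_neg hc, ih fuel acc (Nat.le_of_succ_le_succ h)]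
        simp [List.count_cons, hc]

lemma pvCountQuote (l : List Char) : PySem.Chars.count l ['"'] = l.count '"' := by
  simp [PySem.Chars.count, pvCountGo l l.length 0 (le_refl _)]

-- strip is idempotent
lemma pvDropWhileIdem (p : Char → Bool) (l : List Char) :
    List.dropWhile p (List.dropWhile p l) = List.dropWhile p l := by
  induction l with
  | nil => simp
  | cons c t ih =>
    by_cases h : p c
    · simp [List.dropWhile_cons, h, ih]
    · simp [List.dropWhile_cons, h]

lemma pvRstripIdem (l : List Char) :
    PySem.Chars.rstrip (PySem.Chars.rstrip l) = PySem.Chars.rstrip l := by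
  simp [PySem.Chars.rstrip, pvDropWhileIdem]

lemma pvLstripRstripLstrip (s : List Char) :
    PySem.Chars.lstrip (PySem.Chars.rstrip (PySem.Chars.lstrip s)) =
      PySem.Chars.rstrip (PySem.Chars.lstrip s) := by
  set t := PySem.Chars.lstrip s with ht
  have hts : List.dropWhile PySem.Chars.isspace t = t := by
    rw [ht]; exact pvDropWhileIdem _ s
  show List.dropWhile PySem.Chars.isspace (PySem.Chars.rstrip t) = PySem.Chars.rstrip t
  have hpre : PySem.Chars.rstrip t <+: t := by
    have : List.dropWhile PySem.Chars.isspace t.reverse <:+ t.reverse := List.dropWhile_suffix _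
    have := this.reverse
    simpa [PySem.Chars.rstrip] using this
  rw [List.dropWhile_eq_self_iff]
  intro hl
  have hlen : 0 < t.length := Nat.lt_of_lt_of_le hl hpre.length_le
  have hget : (PySem.Chars.rstrip t)[0] = t[0] := hpre.getElem hl
  rw [hget]
  exact (List.dropWhile_eq_self_iff.mp hts) hlen

lemma pvStripStrip (l : List Char) :
    PySem.Chars.strip (PySem.Chars.strip l) = PySem.Chars.strip l := by
  show PySem.Chars.rstrip (PySem.Chars.lstrip (PySem.Chars.rstrip (PySem.Chars.lstrip l))) = _
  rw [pvLstripRstripLstrip, pvRstripIdem]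
  rfl

-- A's loop on a comma-free chunk just appends it and xors the quote parity
def pvOdd (p : List Char) : Bool := decide (p.count '"' % 2 = 1)

lemma pvOdd_append_quote (p : List Char) : pvOdd (p ++ ['"']) = !pvOdd p := by
  simp only [pvOdd, List.count_append]
  by_cases h : p.count '"' % 2 = 1 <;> simp [h] <;> omega

lemma pvOdd_append_other (p : List Char) (c : Char) (h : c ≠ '"') :
    pvOdd (p ++ [c]) = pvOdd p := by
  simp [pvOdd, List.count_append, List.count_singleton, h]

-- end-of-loop postprocessing of each side
def pvAEnd (st : List (List Char) × List Char × Bool) : List (List Char) :=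
  if st.2.1 ≠ [] then st.1 ++ [PySem.Chars.strip st.2.1] else st.1

def pvBEnd (st : List (List Char) × Option (List Char)) : List (List Char) :=
  match st.2 with | none => st.1 | some b => st.1 ++ [PySem.Chars.strip b]

def pvBufCur : Option (List Char) → List Char
  | none => []
  | some b => b ++ [',']

def pvBufInq : Option (List Char) → Bool
  | none => false
  | some _ => true

lemma pvOdd_bufCur (buf : Option (List Char))
    (hb : ∀ b, buf = some b → pvOdd b = true) : pvOdd (pvBufCur buf) = pvBufInq buf := by
  cases buf with
  | none => simp [pvBufCur, pvBufInq, pvOdd]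
  | some b =>
    have := hb b rfl
    simp only [pvBufCur, pvBufInq]
    rw [pvOdd_append_other _ _ (by decide)]
    exact this

lemma pvOdd_append (p q : List Char) : pvOdd (p ++ q) = (pvOdd p).xor (pvOdd q) := by
  simp only [pvOdd, List.count_append]
  by_cases h1 : p.count '"' % 2 = 1 <;> by_cases h2 : q.count '"' % 2 = 1 <;>
    simp [h1, h2] <;> omega

lemma pvOdd_nonempty (p : List Char) (h : pvOdd p = true) : p ≠ [] := by
  intro he; subst he; simp [pvOdd] at h

-- B's one chunk step, rephrased through pvBufCur
lemma pvBStepEq (args : List (List Char)) (buf : Option (List Char)) (part : List Char) :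
    pvBStep (args, buf) part =
      if pvOdd (pvBufCur buf ++ part) = true then (args, some (pvBufCur buf ++ part))
      else (args ++ [PySem.Chars.strip (pvBufCur buf ++ part)], none) := by
  cases buf with
  | none =>
    simp only [pvBStep, pvBufCur, pvCountQuote, List.nil_append]
    by_cases h : part.count '"' % 2 = 1
    · rw [if_neg (by omega), if_pos (by simp [pvOdd, h])]
    · rw [if_pos (by omega), if_neg (by simp [pvOdd, h])]
  | some b =>
    simp only [pvBStep, pvBufCur, pvCountQuote, List.append_assoc]
    by_cases h : (b ++ ([','] ++ part)).count '"' % 2 = 1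
    · rw [if_neg (by omega), if_pos (by simp [pvOdd, List.count_append] at h ⊢; omega)]
    · rw [if_pos (by omega), if_neg (by simp [pvOdd, List.count_append] at h ⊢; omega)]

-- the three shapes of an A step (used as rewrite rules)
lemma pvAStepQuote (args : List (List Char)) (cur : List Char) (inq : Bool) :
    pvAStep (args, cur, inq) '"' = (args, cur ++ ['"'], !inq) := by
  simp [pvAStep]

lemma pvAStepCommaOut (args : List (List Char)) (cur : List Char) :
    pvAStep (args, cur, false) ',' = (args ++ [PySem.Chars.strip cur], [], false) := by
  simp [pvAStep]

lemma pvAStepCommaIn (args : List (List Char)) (cur : List Char) :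
    pvAStep (args, cur, true) ',' = (args, cur ++ [','], true) := by
  simp [pvAStep]

lemma pvAStepOther (args : List (List Char)) (cur : List Char) (inq : Bool)
    (c : Char) (h1 : c ≠ '"') (h2 : c ≠ ',') :
    pvAStep (args, cur, inq) c = (args, cur ++ [c], inq) := by
  simp [pvAStep, h1, h2]

lemma pvOdd_nil : pvOdd ([] : List Char) = false := by simp [pvOdd]

-- MAIN: B's chunk fold agrees with A's character fold, up to one trailing empty field
lemma pvMain (l : List Char) : ∀ (pfx : List Char) (args : List (List Char))
    (buf : Option (List Char)),
    ',' ∉ pfx →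
    (∀ b, buf = some b → pvOdd b = true) →
    pvBEnd (((pvSplitSpec pfx l)).foldl pvBStep (args, buf)) =
        pvAEnd (l.foldl pvAStep (args, pvBufCur buf ++ pfx, (pvBufInq buf).xor (pvOdd pfx))) ∨
      pvBEnd (((pvSplitSpec pfx l)).foldl pvBStep (args, buf)) =
        pvAEnd (l.foldl pvAStep (args, pvBufCur buf ++ pfx, (pvBufInq buf).xor (pvOdd pfx))) ++ [[]] := by
  induction l with
  | nil =>
    intro pfx args buf hp hb
    have hparity : pvOdd (pvBufCur buf ++ pfx) = (pvBufInq buf).xor (pvOdd pfx) := by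
      rw [pvOdd_append, pvOdd_bufCur buf hb]
    simp only [pvSplitSpec, List.foldl_cons, List.foldl_nil, pvBStepEq, hparity]
    cases hio : (pvBufInq buf).xor (pvOdd pfx) with
    | true =>
      have hne : pvBufCur buf ++ pfx ≠ [] := pvOdd_nonempty _ (by rw [hparity, hio])
      left
      simp [pvBEnd, pvAEnd, hne]
    | false =>
      by_cases hne : pvBufCur buf ++ pfx = []
      · right
        simp [pvBEnd, pvAEnd, hne, PySem.Chars.strip, PySem.Chars.lstrip, PySem.Chars.rstrip]
      · left
        simp [pvBEnd, pvAEnd, hne]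
  | cons c rest ih =>
    intro pfx args buf hp hb
    by_cases hc : c = ','
    · subst hc
      -- B consumes the finished chunk pfx; A consumes the comma
      have hparity : pvOdd (pvBufCur buf ++ pfx) = (pvBufInq buf).xor (pvOdd pfx) := by
        rw [pvOdd_append, pvOdd_bufCur buf hb]
      rw [show pvSplitSpec pfx (',' :: rest) = pfx :: pvSplitSpec [] rest from by
        simp [pvSplitSpec]]
      simp only [List.foldl_cons, pvBStepEq, hparity]
      cases hio : (pvBufInq buf).xor (pvOdd pfx) with
      | true =>
        rw [if_pos rfl, pvAStepCommaIn]
        have := ih [] args (some (pvBufCur buf ++ pfx)) (by simp)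
          (by intro b h; injection h with h; subst h; rw [hparity, hio])
        simpa [pvBufCur, pvBufInq, pvOdd_nil] using this
      | false =>
        rw [if_neg (by simp), pvAStepCommaOut]
        have := ih [] (args ++ [PySem.Chars.strip (pvBufCur buf ++ pfx)]) none
          (by simp) (by intro b h; cases h)
        simpa [pvBufCur, pvBufInq, pvOdd_nil] using this
    · -- B accumulates c onto the pending chunk; A appends it to current_arg
      rw [show pvSplitSpec pfx (c :: rest) = pvSplitSpec (pfx ++ [c]) rest from by
        simp [pvSplitSpec, hc]]
      have hp' : ',' ∉ pfx ++ [c] := by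
        intro h
        rcases List.mem_append.mp h with h | h
        · exact hp h
        · simp at h; exact hc h.symm
      by_cases hq : c = '"'
      · subst hq
        rw [List.foldl_cons, pvAStepQuote]
        have heq : (args, (pvBufCur buf ++ pfx) ++ ['"'], !((pvBufInq buf).xor (pvOdd pfx))) =
            (args, pvBufCur buf ++ (pfx ++ ['"']), (pvBufInq buf).xor (pvOdd (pfx ++ ['"']))) := by
          rw [pvOdd_append_quote, List.append_assoc]
          cases pvBufInq buf <;> cases pvOdd pfx <;> rfl
        rw [heq]
        exact ih (pfx ++ ['"']) args buf hp' hb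
      · rw [List.foldl_cons, pvAStepOther _ _ _ _ hq hc]
        have heq : (args, (pvBufCur buf ++ pfx) ++ [c], (pvBufInq buf).xor (pvOdd pfx)) =
            (args, pvBufCur buf ++ (pfx ++ [c]), (pvBufInq buf).xor (pvOdd (pfx ++ [c]))) := by
          rw [pvOdd_append_other _ _ hq, List.append_assoc]
        rw [heq]
        exact ih (pfx ++ [c]) args buf hp' hb

-- every field A produces is a strip image (so A's second strip is a no-op)
lemma pvAStrip (l : List Char) : ∀ (args : List (List Char)) (cur : List Char) (inq : Bool),
    (∀ x ∈ args, PySem.Chars.strip x = x) →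
    ∀ x ∈ pvAEnd (l.foldl pvAStep (args, cur, inq)), PySem.Chars.strip x = x := by
  induction l with
  | nil =>
    intro args cur inq h x hx
    simp only [List.foldl_nil, pvAEnd] at hx
    by_cases hne : cur ≠ []
    · rw [if_pos hne] at hx
      rcases List.mem_append.mp hx with hx | hx
      · exact h x hx
      · simp only [List.mem_singleton] at hx; subst hx; exact pvStripStrip cur
    · rw [if_neg hne] at hx; exact h x hx
  | cons c rest ih =>
    intro args cur inq h x hx
    rw [List.foldl_cons] at hx
    by_cases h1 : c = '"'
    · subst h1; rw [pvAStepQuote] at hx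
      exact ih _ _ _ h x hx
    · by_cases h2 : c = ',' ∧ inq = false
      · obtain ⟨h2c, h2i⟩ := h2; subst h2c; subst h2i
        rw [pvAStepCommaOut] at hx
        refine ih _ _ _ ?_ x hx
        intro y hy
        rcases List.mem_append.mp hy with hy | hy
        · exact h y hy
        · simp only [List.mem_singleton] at hy; subst hy; exact pvStripStrip cur
      · rw [show pvAStep (args, cur, inq) c = (args, cur ++ [c], inq) from by
          simp [pvAStep, h1, h2]] at hx
        exact ih _ _ _ h x hx

-- final boolean agreement given the list relation
lemma pvBoolFinal (la lb : List (List Char))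
    (hrel : lb = la ∨ lb = la ++ [[]])
    (hstrip : ∀ x ∈ la, PySem.Chars.strip x = x) :
    (if 2 ≤ la.length then
        PySem.Chars.lower (PySem.Chars.strip (la.getD 1 [])) == "true".toList
      else false) =
    (decide (2 ≤ lb.length) && (PySem.Chars.lower (lb.getD 1 []) == "true".toList)) := by
  rcases hrel with h | h
  · rw [h]
    by_cases hlen : 2 ≤ la.length
    · rw [if_pos hlen]
      have hmem : la.getD 1 [] ∈ la := by
        rw [List.getD_eq_getElem _ _ (by omega)]; exact List.getElem_mem _
      rw [hstrip _ hmem]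
      simp [hlen]
    · rw [if_neg hlen]
      simp [hlen]
  · rw [h]
    match la with
    | [] => simp
    | [a] => simp [List.getD]; decide
    | a :: b :: t =>
      have hlen : 2 ≤ (a :: b :: t).length := by simp
      rw [if_pos hlen]
      have hmem : (a :: b :: t).getD 1 [] ∈ a :: b :: t := by
        rw [List.getD_eq_getElem _ _ (by simp)]; exact List.getElem_mem _
      rw [hstrip _ hmem]
      simp [List.getD]

-- ===== VERDICT (by name: the statement is the Claim_ definition above) =====
theorem is_baseline_fixture_spec : Claim_equal_is_baseline_fixture := by
  intro s _
  unfold Spec_is_baseline_fixture is_baseline_fixture is_baseline_fixture_alt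
  by_cases hs : s = ""
  · simp [hs]
  · rw [if_neg hs, if_neg hs]
    rw [pvSplitOn_eq]
    have hmain := pvMain s.toList [] [] none (by simp) (by intro b h; cases h)
    simp only [pvBufCur, pvBufInq, List.nil_append, pvOdd_nil, Bool.false_xor] at hmain
    have hstrip := pvAStrip s.toList [] [] false (by intro x hx; cases hx)
    have hfin := pvBoolFinal
      (pvAEnd (s.toList.foldl pvAStep ([], [], false)))
      (pvBEnd ((pvSplitSpec [] s.toList).foldl pvBStep ([], none)))
      hmain hstrip
    simp only [pvAEnd, pvBEnd] at hfin
    exact hfin
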